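-- pv_equiv track=rewrite | github.com/H1m2n/data-structures | dynamic_programming/leetcode/longest_valid_parenthesis.py | cal_max_consecutive_ones
-- ===== SOURCE A (Python) =====
-- def cal_max_consecutive_ones(arr):
--     max_cons, count = (0, 0)
--     for x in arr:
--         if x == 0:
--             count += 1
--             max_cons = max(max_cons, count)
--         else:
--             count = 0
--     return 2 * max_cons
-- ===== SOURCE B (Python) =====
-- def cal_max_consecutive_ones(arr):
--     best = 0
--     i = 0
--     n = len(arr)
--     while i < n:
--         if arr[i] != 0:
--             i += 1
--         else:
--             j = i
--             while j < n and arr[j] == 0: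
--                 j += 1
--             if j - i > best:
--                 best = j - i
--             i = j
--     return 2 * best
-- ===== Notes on version B (the rewrite author's own statement) =====
-- stated objective: alternative
-- what changed: Replaces A's per-element reset-counter fold by a two-pointer scan that skips each maximal zero run with an inner loop and compares whole run lengths against the best.
import Mathlib
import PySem

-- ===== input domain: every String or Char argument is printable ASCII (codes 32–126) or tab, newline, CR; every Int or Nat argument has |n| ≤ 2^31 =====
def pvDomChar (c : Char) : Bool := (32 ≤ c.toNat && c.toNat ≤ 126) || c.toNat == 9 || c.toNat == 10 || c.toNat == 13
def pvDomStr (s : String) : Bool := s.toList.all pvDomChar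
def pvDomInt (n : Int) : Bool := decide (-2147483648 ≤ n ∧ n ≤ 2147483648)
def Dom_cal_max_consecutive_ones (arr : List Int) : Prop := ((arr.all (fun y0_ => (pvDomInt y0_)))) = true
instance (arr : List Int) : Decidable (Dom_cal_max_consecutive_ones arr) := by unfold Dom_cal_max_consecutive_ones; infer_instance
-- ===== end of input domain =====

-- B replaces A's per-element reset-counter loop by a two-pointer scan skipping whole zero runs (alternative structure, same cost).


-- ===== PORT A =====
-- A: fold over the list with state (max_cons, count); count resets on nonzero.
def cal_max_consecutive_ones (arr : List Int) : Int :=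
  let s := arr.foldl
    (fun (st : Int × Int) x =>
      if x = 0 then (max st.1 (st.2 + 1), st.2 + 1) else (st.1, 0))
    (0, 0)
  2 * s.1

-- ===== PORT B =====
-- B's inner while loop: consume the leading zero run, returning (its length, the rest).
def pvRunB : List Int → Int × List Int
  | [] => (0, [])
  | x :: xs =>
    if x = 0 then
      let p := pvRunB xs
      (p.1 + 1, p.2)
    else (0, x :: xs)

theorem pvRunB_len : ∀ l : List Int, (pvRunB l).2.length ≤ l.length := by
  intro l
  induction l with
  | nil => simp [pvRunB]
  | cons x xs ih =>
    by_cases hx : x = 0 <;> simp [pvRunB, hx] <;> omega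

-- B's outer while loop over the remaining suffix, carrying the best run length.
def pvLoopB (best : Int) : List Int → Int
  | [] => best
  | x :: xs =>
    if x ≠ 0 then pvLoopB best xs
    else
      let p := pvRunB (x :: xs)
      pvLoopB (if p.1 > best then p.1 else best) p.2
termination_by l => l.length
decreasing_by
  · simp
  · simp only [pvRunB, if_pos (by omega : x = 0)]
    have := pvRunB_len xs
    simpa using Nat.lt_succ_of_le this

def cal_max_consecutive_ones_alt (arr : List Int) : Int :=
  2 * pvLoopB 0 arr

-- ===== PRECONDITION & SPEC =====
def Spec_cal_max_consecutive_ones (arr : List Int) (out : Int) : Prop := out = cal_max_consecutive_ones_alt arr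
instance (arr : List Int) (out : Int) : Decidable (Spec_cal_max_consecutive_ones arr out) := by unfold Spec_cal_max_consecutive_ones; infer_instance

-- ===== CLAIM (what is proved, stated in full; the proofs are below) =====
def Claim_equal_cal_max_consecutive_ones : Prop := ∀ (arr : List Int), Dom_cal_max_consecutive_ones arr → Spec_cal_max_consecutive_ones arr (cal_max_consecutive_ones arr)

-- ===== LEMMAS AND PROOFS =====

-- Common reference value: max zero-run length where the first run is seeded with c.
def pvMW (c : Int) : List Int → Int
  | [] => c
  | x :: xs => if x = 0 then pvMW (c + 1) xs else max c (pvMW 0 xs)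

theorem pvMW_ge : ∀ (l : List Int) (c : Int), c ≤ pvMW c l := by
  intro l
  induction l with
  | nil => intro c; simp [pvMW]
  | cons x xs ih =>
    intro c
    by_cases hx : x = 0
    · simp only [pvMW, hx, ite_true]
      have := ih (c + 1); omega
    · simp only [pvMW, hx, ite_false]
      omega

theorem foldA_eq : ∀ (l : List Int) (m c : Int), 0 ≤ c → c ≤ m →
    (l.foldl (fun (st : Int × Int) x =>
      if x = 0 then (max st.1 (st.2 + 1), st.2 + 1) else (st.1, 0)) (m, c)).1
    = max m (pvMW c l) := by
  intro l
  induction l with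
  | nil => intro m c _ hcm; simp [pvMW]; omega
  | cons x xs ih =>
    intro m c hc hcm
    by_cases hx : x = 0
    · simp only [List.foldl, hx, if_pos]
      rw [ih (max m (c + 1)) (c + 1) (by omega) (by omega)]
      have h1 := pvMW_ge xs (c + 1)
      simp only [pvMW, hx, ite_true]
      omega
    · simp only [List.foldl, hx, if_neg, ite_false]
      rw [ih m 0 (by omega) (by omega)]
      simp only [pvMW, hx, ite_false]
      have h0 := pvMW_ge xs (0 : Int)
      omega

theorem pvRunB_mw : ∀ (l : List Int) (k : Int), 0 ≤ k →
    pvMW k l = max (k + (pvRunB l).1) (pvMW 0 (pvRunB l).2) := by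
  intro l
  induction l with
  | nil => intro k hk; simp [pvRunB, pvMW]; omega
  | cons x xs ih =>
    intro k hk
    by_cases hx : x = 0
    · simp only [pvMW, pvRunB, hx, ite_true]
      rw [ih (k + 1) (by omega)]
      ring_nf
    · simp only [pvMW, pvRunB, hx, ite_false]
      have h0 := pvMW_ge xs (0 : Int)
      omega

theorem pvRunB_nonneg : ∀ l : List Int, 0 ≤ (pvRunB l).1 := by
  intro l
  induction l with
  | nil => simp [pvRunB]
  | cons x xs ih => by_cases hx : x = 0 <;> simp [pvRunB, hx] <;> omega

theorem pvLoopB_nil (best : Int) : pvLoopB best [] = best := by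
  simp [pvLoopB]

theorem pvLoopB_cons_nz (best x : Int) (xs : List Int) (hx : x ≠ 0) :
    pvLoopB best (x :: xs) = pvLoopB best xs := by
  rw [pvLoopB]
  simp [hx]

theorem pvLoopB_cons_z (best : Int) (xs : List Int) :
    pvLoopB best (0 :: xs) =
      pvLoopB (if (pvRunB xs).1 + 1 > best then (pvRunB xs).1 + 1 else best) (pvRunB xs).2 := by
  rw [pvLoopB]
  simp [pvRunB]

theorem pvLoopB_eq : ∀ (n : Nat) (l : List Int) (best : Int), l.length ≤ n → 0 ≤ best →
    pvLoopB best l = max best (pvMW 0 l) := by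
  intro n
  induction n with
  | zero =>
    intro l best hl hb
    have : l = [] := by cases l <;> simp_all
    subst this; rw [pvLoopB_nil]; simp [pvMW]; omega
  | succ n ih =>
    intro l best hl hb
    cases l with
    | nil => rw [pvLoopB_nil]; simp [pvMW]; omega
    | cons x xs =>
      by_cases hx : x = 0
      · subst hx
        rw [pvLoopB_cons_z]
        have hlen : (pvRunB xs).2.length ≤ n := by
          have := pvRunB_len xs; simp at hl; omega
        have hc := pvRunB_nonneg xs
        rw [ih _ _ hlen (by split <;> omega)]
        have hmw : pvMW 0 ((0 : Int) :: xs) = max ((pvRunB xs).1 + 1) (pvMW 0 (pvRunB xs).2) := by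
          have h := pvRunB_mw xs 1 (by omega)
          simp only [pvMW, ite_true]
          norm_num
          omega
        rw [hmw]
        split <;> omega
      · rw [pvLoopB_cons_nz _ _ _ hx]
        rw [ih xs best (by simp at hl; omega) hb]
        simp only [pvMW, hx, ite_false]
        have h0 := pvMW_ge xs (0 : Int)
        omega

-- ===== VERDICT (by name: the statement is the Claim_ definition above) =====
theorem cal_max_consecutive_ones_spec : Claim_equal_cal_max_consecutive_ones := by
  intro arr _
  unfold Spec_cal_max_consecutive_ones cal_max_consecutive_ones cal_max_consecutive_ones_alt
  show 2 * (arr.foldl (fun (st : Int × Int) x =>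
      if x = 0 then (max st.1 (st.2 + 1), st.2 + 1) else (st.1, 0)) (0, 0)).1 = 2 * pvLoopB 0 arr
  rw [foldA_eq arr 0 0 le_rfl le_rfl, pvLoopB_eq arr.length arr 0 le_rfl le_rfl]
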